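-- pv_equiv track=rewrite | github.com/sarowarzahan414/supplyshield | src/cli/supplyshield_install.py | gate_decision
-- ===== SOURCE A (Python) =====
-- def gate_decision(results, force=False):
--     """
--     Make the install/block decision based on scan results.
--
--     Returns:
--       - "proceed": safe to install
--       - "confirm": ask user confirmation
--       - "block":   block installation
--       - "force":   blocked but user used --force
--     """
--     max_risk = "CLEAN"
--     risk_order = {"CLEAN": 0, "LOW": 1, "MEDIUM": 2, "HIGH": 3, "CRITICAL": 4}
--
--     for result in results:
--         risk = result["risk_level"]
--         if risk_order.get(risk, 0) > risk_order.get(max_risk, 0):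
--             max_risk = risk
--
--     if max_risk in ("CLEAN", "LOW"):
--         return "proceed"
--     elif max_risk == "MEDIUM":
--         return "confirm"
--     elif force:
--         return "force"
--     else:
--         return "block"
-- ===== SOURCE B (Python) =====
-- def gate_decision(results, force=False):
--     """Decide install action from scan risk levels (priority existence checks)."""
--     if any(r["risk_level"] in ("HIGH", "CRITICAL") for r in results):
--         return "force" if force else "block"
--     if any(r["risk_level"] == "MEDIUM" for r in results):
--         return "confirm"
--     return "proceed"
-- ===== Notes on version B (the rewrite author's own statement) =====
-- stated objective: simpler
-- what changed: Replaces the max-risk accumulator with a risk_order dict and a final branch chain by two short-circuiting existence scans asked in priority order (HIGH/CRITICAL first, then MEDIUM), maintaining no running state.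
import Mathlib
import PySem

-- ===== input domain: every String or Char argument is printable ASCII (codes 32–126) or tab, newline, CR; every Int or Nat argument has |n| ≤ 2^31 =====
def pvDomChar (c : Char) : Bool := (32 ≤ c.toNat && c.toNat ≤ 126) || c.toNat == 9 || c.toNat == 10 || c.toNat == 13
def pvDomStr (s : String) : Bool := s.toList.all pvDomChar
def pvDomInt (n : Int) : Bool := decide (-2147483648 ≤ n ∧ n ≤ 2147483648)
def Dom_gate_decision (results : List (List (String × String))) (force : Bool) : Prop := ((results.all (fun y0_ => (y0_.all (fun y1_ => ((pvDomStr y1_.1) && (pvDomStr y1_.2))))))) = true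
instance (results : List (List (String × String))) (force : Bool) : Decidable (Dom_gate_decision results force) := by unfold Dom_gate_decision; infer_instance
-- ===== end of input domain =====

-- B replaces A's max-risk accumulator + risk_order table + branch chain by two
-- short-circuiting existence scans asked in priority order (simpler; same O(n) cost).

-- ===== PORT A =====
-- result["risk_level"]: Pre_ guarantees the key is present (Python raises KeyError otherwise),
-- so the .getD "" default is never taken on admitted inputs.
def getRisk (r : List (String × String)) : String :=
  ((PySem.Dict.mk r).get? "risk_level").getD ""

def riskOrder : PySem.Dict String Int :=
  PySem.Dict.mk [("CLEAN", 0), ("LOW", 1), ("MEDIUM", 2), ("HIGH", 3), ("CRITICAL", 4)]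

def gate_decision (results : List (List (String × String))) (force : Bool) : String :=
  let max_risk := results.foldl (fun m r =>
    let risk := getRisk r
    if riskOrder.getD risk 0 > riskOrder.getD m 0 then risk else m) "CLEAN"
  if max_risk = "CLEAN" ∨ max_risk = "LOW" then "proceed"
  else if max_risk = "MEDIUM" then "confirm"
  else if force then "force"
  else "block"

-- ===== PORT B =====
def gate_decision_alt (results : List (List (String × String))) (force : Bool) : String :=
  if results.any (fun r => getRisk r == "HIGH" || getRisk r == "CRITICAL") then
    if force then "force" else "block"
  else if results.any (fun r => getRisk r == "MEDIUM") then "confirm"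
  else "proceed"

-- ===== PRECONDITION & SPEC =====
-- Pre_ excludes exactly the inputs where Python A raises KeyError: a result dict without "risk_level".
def Pre_gate_decision (results : List (List (String × String))) (force : Bool) : Prop :=
  (results.all (fun r => (PySem.Dict.mk r).contains "risk_level")) = true
instance (results : List (List (String × String))) (force : Bool) : Decidable (Pre_gate_decision results force) := by unfold Pre_gate_decision; infer_instance

def pvWitness_gate_decision : (List (List (String × String))) × Bool :=
  ([[("risk_level", "HIGH")], [("risk_level", "LOW")]], true)

def Spec_gate_decision (results : List (List (String × String))) (force : Bool) (out : String) : Prop := out = gate_decision_alt results force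
instance (results : List (List (String × String))) (force : Bool) (out : String) : Decidable (Spec_gate_decision results force out) := by unfold Spec_gate_decision; infer_instance

-- ===== CLAIM (what is proved, stated in full; the proofs are below) =====
def Claim_equal_gate_decision : Prop := ∀ (results : List (List (String × String))) (force : Bool), Dom_gate_decision results force → Pre_gate_decision results force → Spec_gate_decision results force (gate_decision results force)

-- ===== LEMMAS AND PROOFS =====

def ord (s : String) : Int := riskOrder.getD s 0

lemma ord_spec (s : String) :
    ord s = if s = "CLEAN" then 0 else if s = "LOW" then 1 else if s = "MEDIUM" then 2
            else if s = "HIGH" then 3 else if s = "CRITICAL" then 4 else 0 := by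
  by_cases h1 : s = "CLEAN"; · subst h1; decide
  by_cases h2 : s = "LOW"; · subst h2; decide
  by_cases h3 : s = "MEDIUM"; · subst h3; decide
  by_cases h4 : s = "HIGH"; · subst h4; decide
  by_cases h5 : s = "CRITICAL"; · subst h5; decide
  have b1 : ("CLEAN" == s) = false := beq_eq_false_iff_ne.mpr (Ne.symm h1)
  have b2 : ("LOW" == s) = false := beq_eq_false_iff_ne.mpr (Ne.symm h2)
  have b3 : ("MEDIUM" == s) = false := beq_eq_false_iff_ne.mpr (Ne.symm h3)
  have b4 : ("HIGH" == s) = false := beq_eq_false_iff_ne.mpr (Ne.symm h4)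
  have b5 : ("CRITICAL" == s) = false := beq_eq_false_iff_ne.mpr (Ne.symm h5)
  simp only [ord, riskOrder, PySem.Dict.getD, PySem.Dict.get?_mk_cons, b1, b2, b3, b4, b5,
    if_false, Bool.false_eq_true, if_neg h1, if_neg h2, if_neg h3, if_neg h4, if_neg h5]
  simp [PySem.Dict.get?]

lemma ord_nonneg (s : String) : 0 ≤ ord s := by
  rw [ord_spec]; split_ifs <;> norm_num

lemma ord_ge3 (s : String) : 3 ≤ ord s ↔ (s = "HIGH" ∨ s = "CRITICAL") := by
  rw [ord_spec]; split_ifs <;> simp_all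

lemma ord_ge2 (s : String) : 2 ≤ ord s ↔ (s = "MEDIUM" ∨ s = "HIGH" ∨ s = "CRITICAL") := by
  rw [ord_spec]; split_ifs <;> simp_all

lemma ord_mem (s : String) (h : 1 ≤ ord s) :
    s = "LOW" ∨ s = "MEDIUM" ∨ s = "HIGH" ∨ s = "CRITICAL" := by
  rw [ord_spec] at h; split_ifs at h <;> simp_all

-- A's loop body, named for the proofs (definitionally equal to the lambda in the port).
def stepA (m : String) (r : List (String × String)) : String :=
  if riskOrder.getD (getRisk r) 0 > riskOrder.getD m 0 then getRisk r else m

lemma foldA_mem (rs : List (List (String × String))) (m : String)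
    (hm : m = "CLEAN" ∨ m = "LOW" ∨ m = "MEDIUM" ∨ m = "HIGH" ∨ m = "CRITICAL") :
    (rs.foldl stepA m) = "CLEAN" ∨ (rs.foldl stepA m) = "LOW" ∨ (rs.foldl stepA m) = "MEDIUM" ∨
    (rs.foldl stepA m) = "HIGH" ∨ (rs.foldl stepA m) = "CRITICAL" := by
  induction rs generalizing m with
  | nil => exact hm
  | cons r rs ih =>
    simp only [List.foldl_cons]
    apply ih
    unfold stepA
    split_ifs with h
    · refine Or.inr (ord_mem _ ?_)
      have h0 := ord_nonneg m
      simp only [ord] at h0 ⊢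
      omega
    · exact hm

lemma ord_foldA (rs : List (List (String × String))) (m : String) :
    ord (rs.foldl stepA m) = rs.foldl (fun a r => max a (ord (getRisk r))) (ord m) := by
  induction rs generalizing m with
  | nil => rfl
  | cons r rs ih =>
    simp only [List.foldl_cons, ih]
    congr 1
    simp only [stepA, ord]
    split_ifs with h <;> omega

lemma foldmax_ge (rs : List (List (String × String))) (c k : Int) :
    k ≤ rs.foldl (fun a r => max a (ord (getRisk r))) c ↔
      k ≤ c ∨ ∃ r ∈ rs, k ≤ ord (getRisk r) := by
  induction rs generalizing c with
  | nil => simp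
  | cons r rs ih =>
    simp only [List.foldl_cons, ih, le_max_iff, List.mem_cons]
    constructor
    · rintro ((h | h) | ⟨x, hx, h⟩)
      · exact Or.inl h
      · exact Or.inr ⟨r, Or.inl rfl, h⟩
      · exact Or.inr ⟨x, Or.inr hx, h⟩
    · rintro (h | ⟨x, hx | hx, h⟩)
      · exact Or.inl (Or.inl h)
      · exact Or.inl (Or.inr (hx ▸ h))
      · exact Or.inr ⟨x, hx, h⟩

lemma anyHC_iff (rs : List (List (String × String))) :
    (rs.any (fun r => getRisk r == "HIGH" || getRisk r == "CRITICAL")) = true ↔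
      ∃ r ∈ rs, 3 ≤ ord (getRisk r) := by
  simp only [List.any_eq_true, Bool.or_eq_true, beq_iff_eq]
  exact ⟨fun ⟨r, hr, h⟩ => ⟨r, hr, (ord_ge3 _).mpr h⟩,
         fun ⟨r, hr, h⟩ => ⟨r, hr, (ord_ge3 _).mp h⟩⟩

lemma anyM_iff (rs : List (List (String × String))) (hnHC : ¬ ∃ r ∈ rs, 3 ≤ ord (getRisk r)) :
    (rs.any (fun r => getRisk r == "MEDIUM")) = true ↔ ∃ r ∈ rs, 2 ≤ ord (getRisk r) := by
  simp only [List.any_eq_true, beq_iff_eq]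
  constructor
  · rintro ⟨r, hr, h⟩
    exact ⟨r, hr, (ord_ge2 _).mpr (Or.inl h)⟩
  · rintro ⟨r, hr, h⟩
    rcases (ord_ge2 _).mp h with h' | h' | h'
    · exact ⟨r, hr, h'⟩
    · exact absurd ⟨r, hr, (ord_ge3 _).mpr (Or.inl h')⟩ hnHC
    · exact absurd ⟨r, hr, (ord_ge3 _).mpr (Or.inr h')⟩ hnHC

-- ===== VERDICT (by name: the statement is the Claim_ definition above) =====
theorem gate_decision_spec : Claim_equal_gate_decision := by
  intro results force _hdom _hpre
  unfold Spec_gate_decision gate_decision gate_decision_alt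
  rw [show (fun (m : String) (r : List (String × String)) =>
        if riskOrder.getD (getRisk r) 0 > riskOrder.getD m 0 then getRisk r else m) = stepA
      from rfl]
  have hmem := foldA_mem results "CLEAN" (Or.inl rfl)
  set F := results.foldl stepA "CLEAN" with hF
  have hord : ord F = results.foldl (fun a r => max a (ord (getRisk r))) 0 := by
    rw [hF, ord_foldA]
    norm_num [ord_spec]
  have hge3 : 3 ≤ ord F ↔ ∃ r ∈ results, 3 ≤ ord (getRisk r) := by
    rw [hord, foldmax_ge]
    constructor
    · rintro (h | h)
      · omega
      · exact h
    · exact Or.inr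
  have hge2 : 2 ≤ ord F ↔ ∃ r ∈ results, 2 ≤ ord (getRisk r) := by
    rw [hord, foldmax_ge]
    constructor
    · rintro (h | h)
      · omega
      · exact h
    · exact Or.inr
  by_cases hHC : (results.any (fun r => getRisk r == "HIGH" || getRisk r == "CRITICAL")) = true
  · have h3 : 3 ≤ ord F := hge3.mpr ((anyHC_iff results).mp hHC)
    have hFhc : F = "HIGH" ∨ F = "CRITICAL" := (ord_ge3 F).mp h3
    rw [if_pos hHC]
    rcases hFhc with h | h <;> rw [h, if_neg (by decide), if_neg (by decide)]
  · have hnHC : ¬ ∃ r ∈ results, 3 ≤ ord (getRisk r) := fun h => hHC ((anyHC_iff results).mpr h)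
    have hlt3 : ¬ 3 ≤ ord F := fun h => hnHC (hge3.mp h)
    rw [if_neg hHC]
    by_cases hM : (results.any (fun r => getRisk r == "MEDIUM")) = true
    · have h2 : 2 ≤ ord F := hge2.mpr ((anyM_iff results hnHC).mp hM)
      have hFm : F = "MEDIUM" := by
        rcases (ord_ge2 F).mp h2 with h | h | h
        · exact h
        · exact absurd ((ord_ge3 F).mpr (Or.inl h)) hlt3
        · exact absurd ((ord_ge3 F).mpr (Or.inr h)) hlt3
      rw [if_pos hM, hFm, if_neg (by decide), if_pos (by decide)]
    · have hlt2 : ¬ 2 ≤ ord F := fun h => hM ((anyM_iff results hnHC).mpr (hge2.mp h))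
      have hFcl : F = "CLEAN" ∨ F = "LOW" := by
        rcases hmem with h | h | h | h | h
        · exact Or.inl h
        · exact Or.inr h
        all_goals exact absurd (by rw [h, ord_spec]; decide : (2:Int) ≤ ord F) hlt2
      rw [if_neg hM]
      rcases hFcl with h | h <;> rw [h, if_pos (by decide)]
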